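-- pv_equiv track=rewrite | github.com/Tima-a/fcd | fcd/utility.py | modify_uniform_num_segments
-- ===== SOURCE A (Python) =====
-- def modify_uniform_num_segments(max_mathematical_mode, N_full):
--     num_seg=max(N_full//5,4)
--     num_segments_uniform=[num_seg]
--
--
--     for k in range(max_mathematical_mode):
--         if k == max_mathematical_mode-1:
--             num_segments_uniform.append(1)
--             continue
--         num_seg=max(num_seg//2,4)
--         num_segments_uniform.append(num_seg)
--     return num_segments_uniform
-- ===== SOURCE B (Python) =====
-- def modify_uniform_num_segments(max_mathematical_mode, N_full):
--     num_seg = max(N_full // 5, 4)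
--     if max_mathematical_mode < 1:
--         return [num_seg]
--     # num_seg >> i is exactly num_seg // 2**i
--     return ([num_seg]
--             + [max(num_seg >> i, 4) for i in range(1, max_mathematical_mode)]
--             + [1])
-- ===== Notes on version B (the rewrite author's own statement) =====
-- stated objective: simpler
-- what changed: Replaced the iterative running-halving accumulator (num_seg = max(num_seg//2,4) carried across loop iterations) by a closed-form per-index comprehension max(num_seg // 2**i, 4), using the identity that repeated clamped halving equals division by 2**i.
import Mathlib
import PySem

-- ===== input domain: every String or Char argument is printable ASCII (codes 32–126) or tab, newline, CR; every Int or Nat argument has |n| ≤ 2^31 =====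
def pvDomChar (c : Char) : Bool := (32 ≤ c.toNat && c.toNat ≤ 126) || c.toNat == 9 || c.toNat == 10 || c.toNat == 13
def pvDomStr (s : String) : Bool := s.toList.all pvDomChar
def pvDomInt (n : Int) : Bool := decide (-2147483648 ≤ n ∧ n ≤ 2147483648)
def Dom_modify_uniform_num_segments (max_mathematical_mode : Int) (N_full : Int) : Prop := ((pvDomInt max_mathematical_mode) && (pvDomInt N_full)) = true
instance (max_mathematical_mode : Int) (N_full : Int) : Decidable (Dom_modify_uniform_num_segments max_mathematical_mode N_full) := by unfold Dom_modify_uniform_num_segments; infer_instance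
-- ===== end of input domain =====

-- B replaces A's running-halving accumulator loop by a closed-form per-index formula
-- max(num_seg // 2**i, 4); objective: simpler (no mutable running state), same cost.

-- ===== PORT A =====
-- the for-loop of A over range(max_mathematical_mode), carrying (num_seg, accumulated list)
def pvALoop (m : Int) (ks : List Int) (num_seg : Int) (acc : List Int) : List Int :=
  match ks with
  | [] => acc
  | k :: rest =>
    if k = m - 1 then
      pvALoop m rest num_seg (acc ++ [1])
    else
      let ns := max (PySem.Int.floordiv num_seg 2) 4
      pvALoop m rest ns (acc ++ [ns])

def modify_uniform_num_segments (max_mathematical_mode : Int) (N_full : Int) : List Int :=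
  let num_seg := max (PySem.Int.floordiv N_full 5) 4
  pvALoop max_mathematical_mode (PySem.List.pyRange 0 max_mathematical_mode 1) num_seg [num_seg]

-- ===== PORT B =====
-- Source B's 'num_seg >> i' is exactly floor division by 2**i; the range gives 1 ≤ i, so i.toNat is exact
def modify_uniform_num_segments_alt (max_mathematical_mode : Int) (N_full : Int) : List Int :=
  let num_seg := max (PySem.Int.floordiv N_full 5) 4
  if max_mathematical_mode < 1 then [num_seg]
  else
    [num_seg]
      ++ (PySem.List.pyRange 1 max_mathematical_mode 1).map
           (fun i => max (PySem.Int.floordiv num_seg (2 ^ i.toNat)) 4)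
      ++ [1]

-- ===== PRECONDITION & SPEC =====
def Spec_modify_uniform_num_segments (max_mathematical_mode : Int) (N_full : Int) (out : List Int) : Prop := out = modify_uniform_num_segments_alt max_mathematical_mode N_full
instance (max_mathematical_mode : Int) (N_full : Int) (out : List Int) : Decidable (Spec_modify_uniform_num_segments max_mathematical_mode N_full out) := by unfold Spec_modify_uniform_num_segments; infer_instance

-- ===== CLAIM (what is proved, stated in full; the proofs are below) =====
def Claim_equal_modify_uniform_num_segments : Prop := ∀ (max_mathematical_mode : Int) (N_full : Int), Dom_modify_uniform_num_segments max_mathematical_mode N_full → Spec_modify_uniform_num_segments max_mathematical_mode N_full (modify_uniform_num_segments max_mathematical_mode N_full)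

-- ===== LEMMAS AND PROOFS =====

-- halving a 2^j-quotient is a 2^(j+1)-quotient
theorem pv_fd_fd_two (x : Int) (j : Nat) :
    PySem.Int.floordiv (PySem.Int.floordiv x (2 ^ j)) 2 = PySem.Int.floordiv x (2 ^ (j + 1)) := by
  rw [PySem.Int.floordiv_eq_ediv_of_pos (by positivity),
      PySem.Int.floordiv_eq_ediv_of_pos (by norm_num),
      PySem.Int.floordiv_eq_ediv_of_pos (by positivity),
      Int.ediv_ediv_of_nonneg (by positivity), pow_succ]

-- the clamp at 4 commutes with the next halving
theorem pv_clamp_half (a : Int) :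
    max (PySem.Int.floordiv (max a 4) 2) 4 = max (PySem.Int.floordiv a 2) 4 := by
  rcases le_total 4 a with h | h
  · rw [max_eq_left h]
  · rw [max_eq_right h]
    rw [PySem.Int.floordiv_eq_ediv_of_pos (by norm_num),
        PySem.Int.floordiv_eq_ediv_of_pos (by norm_num)]
    have : a / 2 ≤ 2 := by omega
    omega

theorem pv_loop_inv (ns : Int) : ∀ (n : Nat) (j m : Int) (acc : List Int),
    0 ≤ j → j + n = m → 1 ≤ n →
    pvALoop m (PySem.List.pyRange j m 1) (max (PySem.Int.floordiv ns (2 ^ j.toNat)) 4) acc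
      = acc ++ (PySem.List.pyRange (j + 1) m 1).map
            (fun i => max (PySem.Int.floordiv ns (2 ^ i.toNat)) 4) ++ [1] := by
  intro n
  induction n with
  | zero => omega
  | succ n ih =>
    intro j m acc hj hm _
    rcases Nat.eq_zero_or_pos n with hn | hn
    · -- last iteration: k = m - 1, append 1
      subst hn
      have hjm : j = m - 1 := by omega
      rw [PySem.List.pyRange_one_cons (by omega)]
      simp only [pvALoop, if_pos hjm]
      rw [PySem.List.pyRange_one_eq_nil (show m ≤ j + 1 by omega)]
      simp [pvALoop]
    · -- k = j ≠ m - 1: halve-and-clamp, which is the closed form at j+1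
      rw [PySem.List.pyRange_one_cons (by omega)]
      simp only [pvALoop, if_neg (by omega : ¬ j = m - 1)]
      have hstep : max (PySem.Int.floordiv (max (PySem.Int.floordiv ns (2 ^ j.toNat)) 4) 2) 4
          = max (PySem.Int.floordiv ns (2 ^ (j + 1).toNat)) 4 := by
        have hje : (j + 1).toNat = j.toNat + 1 := by omega
        rw [pv_clamp_half, pv_fd_fd_two, hje]
      rw [hstep, ih (j + 1) m _ (by omega) (by omega) (by omega)]
      rw [PySem.List.pyRange_one_cons (by omega : j + 1 < m)]
      simp

-- ===== VERDICT (by name: the statement is the Claim_ definition above) =====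
theorem modify_uniform_num_segments_spec : Claim_equal_modify_uniform_num_segments := by
  intro m N _
  unfold Spec_modify_uniform_num_segments modify_uniform_num_segments modify_uniform_num_segments_alt
  set ns : Int := max (PySem.Int.floordiv N 5) 4 with hns
  by_cases hm : m < 1
  · rw [PySem.List.pyRange_one_eq_nil (by omega)]
    simp [pvALoop, if_pos hm]
  · have h1 : (1 : Int) ≤ m := by omega
    have hstart : ns = max (PySem.Int.floordiv ns (2 ^ (0 : Int).toNat)) 4 := by
      have : PySem.Int.floordiv ns 1 = ns := by
        rw [PySem.Int.floordiv_eq_ediv_of_pos (by norm_num), Int.ediv_one]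
      simp [hns]
    have := pv_loop_inv ns m.toNat 0 m [ns] (by omega) (by omega) (by omega)
    simp only [if_neg hm]
    rw [← hstart] at this
    simpa using this
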